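-- pv_equiv track=rewrite | github.com/Dano-sys/aster-Funding-Farmer | news.py | _split_sources
-- ===== SOURCE A (Python) =====
-- from typing import AbstractSet, Iterable, List, Optional, Set, Tuple
--
-- def _split_sources(
--     headlines: List[str],
-- ) -> Tuple[List[str], List[str], List[str], List[str], List[str], List[str]]:
--     gov, snap, gn, rd, xt, other = [], [], [], [], [], []
--     for h in headlines:
--         if h.startswith("[gov] "):
--             gov.append(h)
--         elif h.startswith("[snap] "):
--             snap.append(h)
--         elif h.startswith("[gn] "):
--             gn.append(h)
--         elif h.startswith("[rd] "):
--             rd.append(h)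
--         elif h.startswith("[xt] "):
--             xt.append(h)
--         else:
--             other.append(h)
--     return gov, snap, gn, rd, xt, other
-- ===== SOURCE B (Python) =====
-- def _split_sources(headlines):
--     tags = ("[gov] ", "[snap] ", "[gn] ", "[rd] ", "[xt] ")
--     gov, snap, gn, rd, xt = ([h for h in headlines if h.startswith(t)] for t in tags)
--     other = [h for h in headlines if not h.startswith(tags)]
--     return gov, snap, gn, rd, xt, other
-- ===== Notes on version B (the rewrite author's own statement) =====
-- stated objective: idiomatic
-- what changed: Replaced the single accumulator loop with an elif chain by six independent list comprehensions (one filter per tag, using tuple-startswith for the 'other' bucket); correct because the five tag prefixes are mutually exclusive.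
import Mathlib
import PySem

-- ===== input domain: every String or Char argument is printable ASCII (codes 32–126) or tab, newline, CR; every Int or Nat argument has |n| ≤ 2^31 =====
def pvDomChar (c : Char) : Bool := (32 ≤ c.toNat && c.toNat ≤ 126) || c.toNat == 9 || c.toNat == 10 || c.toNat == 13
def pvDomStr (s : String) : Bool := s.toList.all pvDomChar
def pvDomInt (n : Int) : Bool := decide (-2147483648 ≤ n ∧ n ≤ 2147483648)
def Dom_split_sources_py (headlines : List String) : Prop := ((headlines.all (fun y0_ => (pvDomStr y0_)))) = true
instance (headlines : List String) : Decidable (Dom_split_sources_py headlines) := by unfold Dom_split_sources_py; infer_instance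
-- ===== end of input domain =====

-- B replaces A's six-accumulator elif-chain loop by six independent filters (idiomatic; same O(n) cost).

-- ===== PORT A =====
-- A's loop: one pass, six accumulators, elif chain, append at the end.
def splitLoopA (hs : List String) (gov snap gn rd xt other : List String) :
    List String × List String × List String × List String × List String × List String :=
  match hs with
  | [] => (gov, snap, gn, rd, xt, other)
  | h :: t =>
    if PySem.Str.startswith h "[gov] " then splitLoopA t (gov ++ [h]) snap gn rd xt other
    else if PySem.Str.startswith h "[snap] " then splitLoopA t gov (snap ++ [h]) gn rd xt other
    else if PySem.Str.startswith h "[gn] " then splitLoopA t gov snap (gn ++ [h]) rd xt other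
    else if PySem.Str.startswith h "[rd] " then splitLoopA t gov snap gn (rd ++ [h]) xt other
    else if PySem.Str.startswith h "[xt] " then splitLoopA t gov snap gn rd (xt ++ [h]) other
    else splitLoopA t gov snap gn rd xt (other ++ [h])

def split_sources_py (headlines : List String) :
    List String × List String × List String × List String × List String × List String :=
  splitLoopA headlines [] [] [] [] [] []

-- ===== PORT B =====
-- B: one filter per tag; 'other' keeps what starts with none of the tags (tuple-startswith).
def split_sources_py_alt (headlines : List String) :
    List String × List String × List String × List String × List String × List String :=
  (headlines.filter (fun h => PySem.Str.startswith h "[gov] "),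
   headlines.filter (fun h => PySem.Str.startswith h "[snap] "),
   headlines.filter (fun h => PySem.Str.startswith h "[gn] "),
   headlines.filter (fun h => PySem.Str.startswith h "[rd] "),
   headlines.filter (fun h => PySem.Str.startswith h "[xt] "),
   headlines.filter (fun h => !(PySem.Str.startswith h "[gov] " || PySem.Str.startswith h "[snap] " ||
      PySem.Str.startswith h "[gn] " || PySem.Str.startswith h "[rd] " || PySem.Str.startswith h "[xt] ")))

-- ===== PRECONDITION & SPEC =====
def Spec_split_sources_py (headlines : List String) (out : List String × List String × List String × List String × List String × List String) : Prop := out = split_sources_py_alt headlines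
instance (headlines : List String) (out : List String × List String × List String × List String × List String × List String) : Decidable (Spec_split_sources_py headlines out) := by unfold Spec_split_sources_py; infer_instance

-- ===== CLAIM (what is proved, stated in full; the proofs are below) =====
def Claim_equal_split_sources_py : Prop := ∀ (headlines : List String), Dom_split_sources_py headlines → Spec_split_sources_py headlines (split_sources_py headlines)

-- ===== LEMMAS AND PROOFS =====

-- if p is a prefix of s and q never prefixes p ++ t, then s does not start with q
theorem startswith_excl (s p q : List Char)
    (h : PySem.Chars.startswith s p = true) (hd : ∀ t, ¬ q <+: (p ++ t)) :
    PySem.Chars.startswith s q = false := by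
  obtain ⟨t, rfl⟩ := (PySem.Chars.startswith_iff s p).mp h
  cases h' : PySem.Chars.startswith (p ++ t) q with
  | false => rfl
  | true => exact absurd ((PySem.Chars.startswith_iff (p ++ t) q).mp h') (hd t)

theorem splitLoopA_eq (hs : List String) (gov snap gn rd xt other : List String) :
    splitLoopA hs gov snap gn rd xt other =
      (gov ++ hs.filter (fun h => PySem.Str.startswith h "[gov] "),
       snap ++ hs.filter (fun h => PySem.Str.startswith h "[snap] "),
       gn ++ hs.filter (fun h => PySem.Str.startswith h "[gn] "),
       rd ++ hs.filter (fun h => PySem.Str.startswith h "[rd] "),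
       xt ++ hs.filter (fun h => PySem.Str.startswith h "[xt] "),
       other ++ hs.filter (fun h => !(PySem.Str.startswith h "[gov] " || PySem.Str.startswith h "[snap] " ||
          PySem.Str.startswith h "[gn] " || PySem.Str.startswith h "[rd] " || PySem.Str.startswith h "[xt] "))) := by
  induction hs generalizing gov snap gn rd xt other with
  | nil => simp [splitLoopA]
  | cons h t ih =>
    simp only [splitLoopA]
    split_ifs with h1 h2 h3 h4 h5 <;>
      [ (have c1 : PySem.Chars.startswith h.toList ['[','g','o','v',']',' '] = true := by simpa using h1;
         have c2 : PySem.Chars.startswith h.toList ['[','s','n','a','p',']',' '] = false := startswith_excl _ ['[','g','o','v',']',' '] _ c1 (by intro u; simp [List.cons_prefix_cons]);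
         have c3 : PySem.Chars.startswith h.toList ['[','g','n',']',' '] = false := startswith_excl _ ['[','g','o','v',']',' '] _ c1 (by intro u; simp [List.cons_prefix_cons]);
         have c4 : PySem.Chars.startswith h.toList ['[','r','d',']',' '] = false := startswith_excl _ ['[','g','o','v',']',' '] _ c1 (by intro u; simp [List.cons_prefix_cons]);
         have c5 : PySem.Chars.startswith h.toList ['[','x','t',']',' '] = false := startswith_excl _ ['[','g','o','v',']',' '] _ c1 (by intro u; simp [List.cons_prefix_cons]);
         simp [ih, c1, c2, c3, c4, c5]);
        (have c2 : PySem.Chars.startswith h.toList ['[','s','n','a','p',']',' '] = true := by simpa using h2;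
         have c1 : PySem.Chars.startswith h.toList ['[','g','o','v',']',' '] = false := by simpa using h1;
         have c3 : PySem.Chars.startswith h.toList ['[','g','n',']',' '] = false := startswith_excl _ ['[','s','n','a','p',']',' '] _ c2 (by intro u; simp [List.cons_prefix_cons]);
         have c4 : PySem.Chars.startswith h.toList ['[','r','d',']',' '] = false := startswith_excl _ ['[','s','n','a','p',']',' '] _ c2 (by intro u; simp [List.cons_prefix_cons]);
         have c5 : PySem.Chars.startswith h.toList ['[','x','t',']',' '] = false := startswith_excl _ ['[','s','n','a','p',']',' '] _ c2 (by intro u; simp [List.cons_prefix_cons]);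
         simp [ih, c1, c2, c3, c4, c5]);
        (have c3 : PySem.Chars.startswith h.toList ['[','g','n',']',' '] = true := by simpa using h3;
         have c1 : PySem.Chars.startswith h.toList ['[','g','o','v',']',' '] = false := by simpa using h1;
         have c2 : PySem.Chars.startswith h.toList ['[','s','n','a','p',']',' '] = false := by simpa using h2;
         have c4 : PySem.Chars.startswith h.toList ['[','r','d',']',' '] = false := startswith_excl _ ['[','g','n',']',' '] _ c3 (by intro u; simp [List.cons_prefix_cons]);
         have c5 : PySem.Chars.startswith h.toList ['[','x','t',']',' '] = false := startswith_excl _ ['[','g','n',']',' '] _ c3 (by intro u; simp [List.cons_prefix_cons]);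
         simp [ih, c1, c2, c3, c4, c5]);
        (have c4 : PySem.Chars.startswith h.toList ['[','r','d',']',' '] = true := by simpa using h4;
         have c1 : PySem.Chars.startswith h.toList ['[','g','o','v',']',' '] = false := by simpa using h1;
         have c2 : PySem.Chars.startswith h.toList ['[','s','n','a','p',']',' '] = false := by simpa using h2;
         have c3 : PySem.Chars.startswith h.toList ['[','g','n',']',' '] = false := by simpa using h3;
         have c5 : PySem.Chars.startswith h.toList ['[','x','t',']',' '] = false := startswith_excl _ ['[','r','d',']',' '] _ c4 (by intro u; simp [List.cons_prefix_cons]);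
         simp [ih, c1, c2, c3, c4, c5]);
        (have c5 : PySem.Chars.startswith h.toList ['[','x','t',']',' '] = true := by simpa using h5;
         have c1 : PySem.Chars.startswith h.toList ['[','g','o','v',']',' '] = false := by simpa using h1;
         have c2 : PySem.Chars.startswith h.toList ['[','s','n','a','p',']',' '] = false := by simpa using h2;
         have c3 : PySem.Chars.startswith h.toList ['[','g','n',']',' '] = false := by simpa using h3;
         have c4 : PySem.Chars.startswith h.toList ['[','r','d',']',' '] = false := by simpa using h4;
         simp [ih, c1, c2, c3, c4, c5]);
        (have c1 : PySem.Chars.startswith h.toList ['[','g','o','v',']',' '] = false := by simpa using h1;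
         have c2 : PySem.Chars.startswith h.toList ['[','s','n','a','p',']',' '] = false := by simpa using h2;
         have c3 : PySem.Chars.startswith h.toList ['[','g','n',']',' '] = false := by simpa using h3;
         have c4 : PySem.Chars.startswith h.toList ['[','r','d',']',' '] = false := by simpa using h4;
         have c5 : PySem.Chars.startswith h.toList ['[','x','t',']',' '] = false := by simpa using h5;
         simp [ih, c1, c2, c3, c4, c5])]

-- ===== VERDICT (by name: the statement is the Claim_ definition above) =====
theorem split_sources_py_spec : Claim_equal_split_sources_py := by
  intro headlines _
  show split_sources_py headlines = split_sources_py_alt headlines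
  simp [split_sources_py, split_sources_py_alt, splitLoopA_eq]
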